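-- pv_equiv track=rewrite | github.com/trevor-nichols/agentrules-architect | src/agentrules/cli/ui/settings/models/__init__.py | _preferred_codex_effort_order
-- ===== SOURCE A (Python) =====
-- def _preferred_codex_effort_order(selected_effort: str | None) -> tuple[str | None, ...]:
--     ordered_candidates: list[str | None] = []
--
--     def _append(value: str | None) -> None:
--         if value not in ordered_candidates:
--             ordered_candidates.append(value)
--
--     _append(selected_effort)
--     for value in ("medium", "high", "low", "minimal", "none", "xhigh", None):
--         _append(value)
--     return tuple(ordered_candidates)
-- ===== SOURCE B (Python) =====
-- # Table-based formulation: the seven known selections map to precomputed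
-- # answer tuples; any other selection just gets prepended to the base order.
-- _PRECOMPUTED = {
--     "medium":  ("medium", "high", "low", "minimal", "none", "xhigh", None),
--     "high":    ("high", "medium", "low", "minimal", "none", "xhigh", None),
--     "low":     ("low", "medium", "high", "minimal", "none", "xhigh", None),
--     "minimal": ("minimal", "medium", "high", "low", "none", "xhigh", None),
--     "none":    ("none", "medium", "high", "low", "minimal", "xhigh", None),
--     "xhigh":   ("xhigh", "medium", "high", "low", "minimal", "none", None),
--     None:      (None, "medium", "high", "low", "minimal", "none", "xhigh"),
-- }
--
-- def _preferred_codex_effort_order(selected_effort):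
--     hit = _PRECOMPUTED.get(selected_effort)
--     if hit is not None:
--         return hit
--     return (selected_effort, "medium", "high", "low", "minimal", "none", "xhigh", None)
-- ===== Notes on version B (the rewrite author's own statement) =====
-- stated objective: alternative
-- what changed: Replaces the incremental membership-checked _append loop with a precomputed lookup table: the seven known selections map directly to their full answer tuples, and any other selection is prepended to the fixed base order.
import Mathlib
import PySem

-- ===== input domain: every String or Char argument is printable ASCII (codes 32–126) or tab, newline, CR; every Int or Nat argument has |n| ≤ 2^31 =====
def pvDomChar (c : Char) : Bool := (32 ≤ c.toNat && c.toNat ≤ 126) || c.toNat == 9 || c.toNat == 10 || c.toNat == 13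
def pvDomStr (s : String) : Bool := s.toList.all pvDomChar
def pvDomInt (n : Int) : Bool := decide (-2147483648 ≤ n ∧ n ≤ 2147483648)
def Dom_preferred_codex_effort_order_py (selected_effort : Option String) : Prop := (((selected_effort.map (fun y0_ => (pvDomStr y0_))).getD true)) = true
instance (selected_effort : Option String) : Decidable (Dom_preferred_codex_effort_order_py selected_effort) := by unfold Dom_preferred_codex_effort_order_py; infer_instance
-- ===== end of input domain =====

-- B replaces A's incremental membership-checked append loop with a precomputed lookup table of full answer tuples (alternative decomposition, same cost).

-- ===== PORT A =====
-- _append: append value if not already present (literal transliteration of A's helper)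
def pvAppend (l : List (Option String)) (v : Option String) : List (Option String) :=
  if v ∈ l then l else l ++ [v]

def preferred_codex_effort_order_py (selected_effort : Option String) : List (Option String) :=
  let l0 := pvAppend [] selected_effort
  ([some "medium", some "high", some "low", some "minimal", some "none", some "xhigh", none]).foldl pvAppend l0

-- ===== PORT B =====
-- B's precomputed table: the seven known selections map to their full answer tuples
def pvPrecomputed : PySem.Dict (Option String) (List (Option String)) :=
  PySem.Dict.ofList [ (some "medium",  [some "medium", some "high", some "low", some "minimal", some "none", some "xhigh", none]),
    (some "high",    [some "high", some "medium", some "low", some "minimal", some "none", some "xhigh", none]),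
    (some "low",     [some "low", some "medium", some "high", some "minimal", some "none", some "xhigh", none]),
    (some "minimal", [some "minimal", some "medium", some "high", some "low", some "none", some "xhigh", none]),
    (some "none",    [some "none", some "medium", some "high", some "low", some "minimal", some "xhigh", none]),
    (some "xhigh",   [some "xhigh", some "medium", some "high", some "low", some "minimal", some "none", none]),
    (none,           [none, some "medium", some "high", some "low", some "minimal", some "none", some "xhigh"]) ]

def preferred_codex_effort_order_py_alt (selected_effort : Option String) : List (Option String) :=
  match PySem.Dict.get? pvPrecomputed selected_effort with
  | some hit => hit
  | none => [selected_effort, some "medium", some "high", some "low", some "minimal", some "none", some "xhigh", none]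

-- ===== PRECONDITION & SPEC =====
def Spec_preferred_codex_effort_order_py (selected_effort : Option String) (out : List (Option String)) : Prop := out = preferred_codex_effort_order_py_alt selected_effort
instance (selected_effort : Option String) (out : List (Option String)) : Decidable (Spec_preferred_codex_effort_order_py selected_effort out) := by unfold Spec_preferred_codex_effort_order_py; infer_instance

-- ===== CLAIM (what is proved, stated in full; the proofs are below) =====
def Claim_equal_preferred_codex_effort_order_py : Prop := ∀ (selected_effort : Option String), Dom_preferred_codex_effort_order_py selected_effort → Spec_preferred_codex_effort_order_py selected_effort (preferred_codex_effort_order_py selected_effort)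

-- ===== LEMMAS AND PROOFS =====

-- ===== VERDICT (by name: the statement is the Claim_ definition above) =====
theorem preferred_codex_effort_order_py_spec : Claim_equal_preferred_codex_effort_order_py := by
  intro s _
  unfold Spec_preferred_codex_effort_order_py
  cases s with
  | none => decide
  | some x =>
    by_cases h1 : x = "medium"
    · subst h1; decide
    by_cases h2 : x = "high"
    · subst h2; decide
    by_cases h3 : x = "low"
    · subst h3; decide
    by_cases h4 : x = "minimal"
    · subst h4; decide
    by_cases h5 : x = "none"
    · subst h5; decide
    by_cases h6 : x = "xhigh"
    · subst h6; decide
    have h1' : ¬ "medium" = x := fun h => h1 h.symm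
    have h2' : ¬ "high" = x := fun h => h2 h.symm
    have h3' : ¬ "low" = x := fun h => h3 h.symm
    have h4' : ¬ "minimal" = x := fun h => h4 h.symm
    have h5' : ¬ "none" = x := fun h => h5 h.symm
    have h6' : ¬ "xhigh" = x := fun h => h6 h.symm
    have hmk : pvPrecomputed = PySem.Dict.mk
        [ (some "medium",  [some "medium", some "high", some "low", some "minimal", some "none", some "xhigh", none]),
          (some "high",    [some "high", some "medium", some "low", some "minimal", some "none", some "xhigh", none]),
          (some "low",     [some "low", some "medium", some "high", some "minimal", some "none", some "xhigh", none]),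
          (some "minimal", [some "minimal", some "medium", some "high", some "low", some "none", some "xhigh", none]),
          (some "none",    [some "none", some "medium", some "high", some "low", some "minimal", some "xhigh", none]),
          (some "xhigh",   [some "xhigh", some "medium", some "high", some "low", some "minimal", some "none", none]),
          (none,           [none, some "medium", some "high", some "low", some "minimal", some "none", some "xhigh"]) ] := by
      decide
    simp [preferred_codex_effort_order_py, preferred_codex_effort_order_py_alt, pvAppend,
      hmk, PySem.Dict.get?_mk_cons, PySem.Dict.get?,
      List.mem_cons, h1, h2, h3, h4, h5, h6, h1', h2', h3', h4', h5', h6']
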